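-- pv_equiv track=rewrite | github.com/Schellcunn/Advent2024 | Day22/bananatest.py | part1
-- ===== SOURCE A (Python) =====
-- from collections import defaultdict
--
-- def mix_prune(secret:int, num:int) -> int:
--     return (secret ^ num) % 16777216
--
-- def part1(data:list) -> int:
--     total = 0
--     changes4 = defaultdict(list)
--     for x in data:
--         prev = x % 10
--         change = (prev,)
--         first = set()
--         for _ in range(2000):
--             x = mix_prune(x, x * 64)
--             x = mix_prune(x, x // 32)
--             x = mix_prune(x, x * 2048)
--             last = x % 10
--             if len(change) > 3:
--                 change = change[1:] + (last - prev,)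
--                 if change not in first:
--                     changes4[change].append(last)
--                     first.add(change)
--             else:
--                 change += (last - prev,)
--             prev = last
--         total += x
--     return total, max(sum(nums) for nums in changes4.values())
-- ===== SOURCE B (Python) =====
-- def _next_secret(x):
--     M = 16777216
--     x = (x ^ (x * 64)) % M
--     x = (x ^ (x // 32)) % M
--     x = (x ^ (x * 2048)) % M
--     return x
--
-- def part1(data: list) -> int:
--     total = 0
--     acc = {}
--     for secret in data:
--         # full price list: 2001 mod-10 values
--         x = secret
--         prices = [x % 10]
--         for _ in range(2000):
--             x = _next_secret(x)
--             prices.append(x % 10)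
--         total += x
--         diffs = [prices[i + 1] - prices[i] for i in range(2000)]
--         # index-based window pass, first occurrence per buyer
--         seen = set()
--         for j in range(3, 2000):
--             w = tuple(diffs[j - 3:j + 1])
--             if w not in seen:
--                 seen.add(w)
--                 acc[w] = acc.get(w, 0) + prices[j + 1]
--     return total, max(acc.values())
-- ===== Notes on version B (the rewrite author's own statement) =====
-- stated objective: simpler
-- what changed: A's single fused per-buyer loop that threads the PRNG, a sliding 4-tuple of diffs and a defaultdict of price lists (summed at the end) is replaced by a staged decomposition: build the full 2001-entry price list, derive the 2000-entry diff list, then an index-based window pass over j=3..1999 that adds prices[j+1] into a dict of running sums keyed by the 4-diff window.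
-- outside the precondition, e.g. on part1([]): A raises ValueError, B raises ValueError
import Mathlib
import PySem

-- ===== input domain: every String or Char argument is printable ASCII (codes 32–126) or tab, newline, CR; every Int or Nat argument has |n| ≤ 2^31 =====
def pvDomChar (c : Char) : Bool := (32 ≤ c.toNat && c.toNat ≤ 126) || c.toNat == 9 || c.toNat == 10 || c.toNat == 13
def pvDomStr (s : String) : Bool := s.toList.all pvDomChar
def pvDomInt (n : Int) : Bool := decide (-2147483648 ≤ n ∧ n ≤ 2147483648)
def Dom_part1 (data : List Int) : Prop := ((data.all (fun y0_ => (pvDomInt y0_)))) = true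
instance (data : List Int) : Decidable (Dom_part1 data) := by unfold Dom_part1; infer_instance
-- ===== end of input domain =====

-- B restructures A's single fused loop into: full price list, diff list, then an index-based
-- window pass keeping per-buyer first occurrences in a dict of SUMS (A keeps a dict of lists
-- summed only at the end); objective: simpler decomposition, same cost.

-- ===== PORT A =====
def mix_prune (secret num : Int) : Int :=
  PySem.Int.mod (PySem.Int.bxor secret num) 16777216

-- body of A's inner `for _ in range(2000)` loop; state = (x, prev, change, first, changes4)
def part1_inner (s : Int × Int × List Int × PySem.Set (List Int) × PySem.Dict (List Int) (List Int))
    (_ : Int) : Int × Int × List Int × PySem.Set (List Int) × PySem.Dict (List Int) (List Int) :=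
  let x := mix_prune s.1 (s.1 * 64)
  let x := mix_prune x (PySem.Int.floordiv x 32)
  let x := mix_prune x (x * 2048)
  let last := PySem.Int.mod x 10
  let prev := s.2.1
  let change := s.2.2.1
  let first := s.2.2.2.1
  let changes4 := s.2.2.2.2
  if change.length > 3 then
    let change := PySem.List.slice change (some 1) none ++ [last - prev]
    if first.contains change then (x, last, change, first, changes4)
    else (x, last, change, PySem.Set.add first change,
          PySem.Dict.modify changes4 change [] (· ++ [last]))
  else (x, last, change ++ [last - prev], first, changes4)

-- body of A's outer `for x in data` loop; accumulator = (total, changes4)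
def part1_buyer (acc : Int × PySem.Dict (List Int) (List Int)) (x0 : Int) :
    Int × PySem.Dict (List Int) (List Int) :=
  let prev := PySem.Int.mod x0 10
  let st := (PySem.List.pyRange 0 2000 1).foldl part1_inner
    (x0, prev, [prev], PySem.Set.empty, acc.2)
  (acc.1 + st.1, st.2.2.2.2)

def part1 (data : List Int) : Int × Int :=
  let r := data.foldl part1_buyer (0, PySem.Dict.mk [])
  (r.1, (PySem.List.max? (r.2.values.map (fun nums => nums.sum)) (fun v => v)).getD 0)

-- ===== PORT B =====
def next_secret (x : Int) : Int :=
  let x := PySem.Int.mod (PySem.Int.bxor x (x * 64)) 16777216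
  let x := PySem.Int.mod (PySem.Int.bxor x (PySem.Int.floordiv x 32)) 16777216
  PySem.Int.mod (PySem.Int.bxor x (x * 2048)) 16777216

-- body of B's price-building loop; state = (x, prices)
def part1_alt_price_step (s : Int × List Int) (_ : Int) : Int × List Int :=
  let x := next_secret s.1
  (x, s.2 ++ [PySem.Int.mod x 10])

-- body of B's `for j in range(3, 2000)` window pass; state = (seen, acc)
def part1_alt_window_step (prices diffs : List Int)
    (s : PySem.Set (List Int) × PySem.Dict (List Int) Int) (j : Int) :
    PySem.Set (List Int) × PySem.Dict (List Int) Int :=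
  let w := PySem.List.slice diffs (some (j - 3)) (some (j + 1))
  if s.1.contains w then s
  else (PySem.Set.add s.1 w,
        PySem.Dict.insert s.2 w (s.2.getD w 0 + PySem.List.pyGetD prices (j + 1) 0))

-- body of B's outer `for secret in data` loop; accumulator = (total, acc)
def part1_alt_buyer (acc : Int × PySem.Dict (List Int) Int) (secret : Int) :
    Int × PySem.Dict (List Int) Int :=
  let xp := (PySem.List.pyRange 0 2000 1).foldl part1_alt_price_step
    (secret, [PySem.Int.mod secret 10])
  let prices := xp.2
  let diffs := (PySem.List.pyRange 0 2000 1).map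
    (fun i => PySem.List.pyGetD prices (i + 1) 0 - PySem.List.pyGetD prices i 0)
  let sd := (PySem.List.pyRange 3 2000 1).foldl (part1_alt_window_step prices diffs)
    (PySem.Set.empty, acc.2)
  (acc.1 + xp.1, sd.2)

def part1_alt (data : List Int) : Int × Int :=
  let r := data.foldl part1_alt_buyer (0, PySem.Dict.mk [])
  (r.1, (PySem.List.max? r.2.values (fun v => v)).getD 0)

-- ===== PRECONDITION & SPEC =====
-- Pre_ excludes only the empty list, on which Python A raises ValueError (max of an empty sequence).
def Pre_part1 (data : List Int) : Prop := data ≠ []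
instance (data : List Int) : Decidable (Pre_part1 data) := by unfold Pre_part1; infer_instance
def pvWitness_part1 : List Int := ([123])

def Spec_part1 (data : List Int) (out : Int × Int) : Prop := out = part1_alt data
instance (data : List Int) (out : Int × Int) : Decidable (Spec_part1 data out) := by unfold Spec_part1; infer_instance

-- ===== CLAIM (what is proved, stated in full; the proofs are below) =====
def Claim_equal_part1 : Prop := ∀ (data : List Int), Dom_part1 data → Pre_part1 data → Spec_part1 data (part1 data)

-- ===== LEMMAS AND PROOFS =====

-- the k-th secret, price, price difference, and 4-diff window of a buyer starting at x
def pvIter : Nat → Int → Int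
  | 0, x => x
  | n + 1, x => next_secret (pvIter n x)

def pvP (x : Int) (k : Nat) : Int := PySem.Int.mod (pvIter k x) 10
def pvD (x : Int) (k : Nat) : Int := pvP x k - pvP x (k - 1)
def pvW (x : Int) (k : Nat) : List Int := [pvD x (k - 3), pvD x (k - 2), pvD x (k - 1), pvD x k]

-- the raw (window, price) event stream of steps 4..n for a buyer starting at x
def pvRaw (x : Int) (n : Nat) : List (List Int × Int) :=
  (List.range' 4 (n - 3)).map (fun k => (pvW x k, pvP x k))

-- one deduplicated event applied to A's (seen, dict-of-lists) resp. B's (seen, dict-of-sums)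
def pvGA (sd : PySem.Set (List Int) × PySem.Dict (List Int) (List Int)) (e : List Int × Int) :
    PySem.Set (List Int) × PySem.Dict (List Int) (List Int) :=
  if sd.1.contains e.1 then sd
  else (PySem.Set.add sd.1 e.1, PySem.Dict.modify sd.2 e.1 [] (· ++ [e.2]))

def pvGB (sd : PySem.Set (List Int) × PySem.Dict (List Int) Int) (e : List Int × Int) :
    PySem.Set (List Int) × PySem.Dict (List Int) Int :=
  if sd.1.contains e.1 then sd
  else (PySem.Set.add sd.1 e.1, PySem.Dict.insert sd.2 e.1 (sd.2.getD e.1 0 + e.2))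

-- value map relating A's dict (lists of prices) to B's dict (their sums)
def pvG (p : List Int × List Int) : List Int × Int := (p.1, p.2.sum)

lemma pvRaw_succ (x : Int) (n : Nat) (h : 3 ≤ n) :
    pvRaw x (n + 1) = pvRaw x n ++ [(pvW x (n + 1), pvP x (n + 1))] := by
  unfold pvRaw
  rw [show n + 1 - 3 = (n - 3) + 1 by omega, List.range'_1_concat, List.map_append]
  simp [show 4 + (n - 3) = n + 1 by omega]

lemma pvTake4 (g : Nat → Int) (N a : Nat) (h : a + 4 ≤ N) :
    ((((List.range N).map g).drop a).take 4) = [g a, g (a + 1), g (a + 2), g (a + 3)] := by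
  apply List.ext_getElem
  · simp; omega
  · intro i h1 h2
    simp only [List.getElem_take, List.getElem_drop, List.getElem_map, List.getElem_range]
    simp only [List.length_take, List.length_map, List.length_range, List.length_drop] at h1
    have h4 : i < 4 := lt_of_lt_of_le h1 (min_le_left _ _)
    interval_cases i <;> simp

-- A's inner loop after n ≥ 3 iterations
lemma A_loop (x0 : Int) (d : PySem.Dict (List Int) (List Int)) (n : Nat) (h3 : 3 ≤ n) :
    (PySem.List.pyRange 0 (n : Int) 1).foldl part1_inner
      (x0, pvP x0 0, [pvP x0 0], PySem.Set.empty, d)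
    = (pvIter n x0, pvP x0 n,
       (if n = 3 then pvP x0 0 else pvD x0 (n - 3)) :: [pvD x0 (n - 2), pvD x0 (n - 1), pvD x0 n],
       (pvRaw x0 n).foldl pvGA (PySem.Set.empty, d)) := by
  induction n, h3 using Nat.le_induction with
  | base => rfl
  | succ n hn ih =>
    have hc : ((n+1 : Nat) : Int) = (n : Int) + 1 := by push_cast; ring
    rw [hc, PySem.List.pyRange_one_succ_right (by positivity), List.foldl_append, ih]
    rw [pvRaw_succ x0 n hn, List.foldl_append]
    simp only [List.foldl_cons, List.foldl_nil]
    have h3 : ¬ (n + 1 = 3) := by omega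
    have e1 : n + 1 - 3 = n - 2 := by omega
    have e2 : n + 1 - 2 = n - 1 := by omega
    have e3 : n + 1 - 1 = n := by omega
    have hw : pvW x0 (n+1) = [pvD x0 (n-2), pvD x0 (n-1), pvD x0 n, pvD x0 (n+1)] := by
      unfold pvW; rw [e1, e2, e3]
    simp only [part1_inner, PySem.List.slice_from_one, List.length_cons, List.length_nil, h3,
      if_false, e1, e2, e3, List.tail_cons, pvGA, hw]
    have hx : mix_prune (mix_prune (mix_prune (pvIter n x0) (pvIter n x0 * 64))
        (PySem.Int.floordiv (mix_prune (pvIter n x0) (pvIter n x0 * 64)) 32))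
        (mix_prune (mix_prune (pvIter n x0) (pvIter n x0 * 64))
          (PySem.Int.floordiv (mix_prune (pvIter n x0) (pvIter n x0 * 64)) 32) * 2048)
        = pvIter (n + 1) x0 := rfl
    have hp : PySem.Int.mod (pvIter (n + 1) x0) 10 = pvP x0 (n + 1) := rfl
    have hd : pvP x0 (n + 1) - pvP x0 n = pvD x0 (n + 1) := by unfold pvD; rw [e3]
    simp only [hx, hp, hd]
    norm_num
    split_ifs <;> rfl

-- B's price loop
lemma B_prices (x0 : Int) (n : Nat) :
    (PySem.List.pyRange 0 (n : Int) 1).foldl part1_alt_price_step (x0, [pvP x0 0])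
    = (pvIter n x0, (List.range (n + 1)).map (pvP x0)) := by
  induction n with
  | zero => rfl
  | succ n ih =>
    have hc : ((n+1 : Nat) : Int) = (n : Int) + 1 := by push_cast; ring
    rw [hc, PySem.List.pyRange_one_succ_right (by positivity), List.foldl_append, ih]
    simp only [List.foldl_cons, List.foldl_nil, part1_alt_price_step, List.range_succ,
      List.map_append]
    rfl

-- B's diff comprehension
lemma B_diffs (x0 : Int) :
    (PySem.List.pyRange 0 2000 1).map
      (fun i => PySem.List.pyGetD ((List.range 2001).map (pvP x0)) (i + 1) 0
              - PySem.List.pyGetD ((List.range 2001).map (pvP x0)) i 0)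
    = (List.range 2000).map (fun i => pvD x0 (i + 1)) := by
  rw [PySem.List.pyRange_one]
  norm_num
  rw [show Int.toNat 2000 = 2000 from rfl]
  apply List.map_congr_left
  intro k hk
  simp only [List.mem_range] at hk
  show PySem.List.pyGetD _ ((k : Int) + 1) 0 - PySem.List.pyGetD _ (k : Int) 0 = pvD x0 (k + 1)
  rw [show ((k : Int) + 1) = ((k + 1 : Nat) : Int) by push_cast; ring]
  rw [PySem.List.pyGetD_natCast, PySem.List.pyGetD_natCast]
  rw [PySem.List.getD_map_range _ _ _ _ (by omega), PySem.List.getD_map_range _ _ _ _ (by omega)]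
  unfold pvD
  simp

-- B's window pass
lemma B_windows (x0 : Int) (d : PySem.Dict (List Int) Int) (n : Nat) (h3 : 3 ≤ n) :
    n ≤ 2000 →
    (PySem.List.pyRange 3 (n : Int) 1).foldl
      (part1_alt_window_step ((List.range 2001).map (pvP x0))
        ((List.range 2000).map (fun i => pvD x0 (i + 1))))
      (PySem.Set.empty, d)
    = (pvRaw x0 n).foldl pvGB (PySem.Set.empty, d) := by
  induction n, h3 using Nat.le_induction with
  | base => intro _; rfl
  | succ n hn ih =>
    intro h2000
    have hc : ((n+1 : Nat) : Int) = (n : Int) + 1 := by push_cast; ring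
    rw [hc, PySem.List.pyRange_one_succ_right (by exact_mod_cast hn), List.foldl_append,
      ih (by omega)]
    rw [pvRaw_succ x0 n hn, List.foldl_append]
    simp only [List.foldl_cons, List.foldl_nil]
    unfold part1_alt_window_step
    have e1 : ((n : Int) - 3) = ((n - 3 : Nat) : Int) := by omega
    have e2 : ((n : Int) + 1) = ((n + 1 : Nat) : Int) := by omega
    rw [e1, e2, PySem.List.slice_natCast, show n + 1 - (n - 3) = 4 by omega]
    rw [pvTake4 _ 2000 (n - 3) (by omega)]
    have hw : [pvD x0 ((n-3) + 1), pvD x0 ((n-3) + 1 + 1), pvD x0 ((n-3) + 2 + 1),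
        pvD x0 ((n-3) + 3 + 1)] = pvW x0 (n+1) := by
      unfold pvW
      simp only [List.cons.injEq, and_true]
      refine ⟨?_, ?_, ?_, ?_⟩ <;> (congr 1; omega)
    rw [PySem.List.pyGetD_natCast, PySem.List.getD_map_range _ _ _ _ (by omega)]
    simp only [pvGB]
    rw [hw]

lemma part1_buyer_eq (tot : Int) (d : PySem.Dict (List Int) (List Int)) (x0 : Int) :
    part1_buyer (tot, d) x0
    = (tot + pvIter 2000 x0, ((pvRaw x0 2000).foldl pvGA (PySem.Set.empty, d)).2) := by
  have h : (PySem.List.pyRange 0 2000 1).foldl part1_inner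
      (x0, PySem.Int.mod x0 10, [PySem.Int.mod x0 10], PySem.Set.empty, d)
      = (pvIter 2000 x0, pvP x0 2000,
         [pvD x0 1997, pvD x0 1998, pvD x0 1999, pvD x0 2000],
         (pvRaw x0 2000).foldl pvGA (PySem.Set.empty, d)) := by
    have h0 := A_loop x0 d 2000 (by omega)
    simp only [Nat.cast_ofNat, show (2000:Nat)-3 = 1997 from rfl, show (2000:Nat)-2 = 1998 from rfl,
      show (2000:Nat)-1 = 1999 from rfl, if_neg (show ¬((2000:Nat) = 3) by decide)] at h0
    exact h0
  show (fun st : Int × Int × List Int × PySem.Set (List Int) × PySem.Dict (List Int) (List Int) =>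
      ((tot, d).1 + st.1, st.2.2.2.2))
      ((PySem.List.pyRange 0 2000 1).foldl part1_inner
        (x0, PySem.Int.mod x0 10, [PySem.Int.mod x0 10], PySem.Set.empty, (tot, d).2)) = _
  conv_lhs => rw [show ((tot, d).2) = d from rfl, show ((tot, d).1) = tot from rfl]
  conv_lhs => rw [h]

lemma part1_alt_buyer_eq (tot : Int) (d : PySem.Dict (List Int) Int) (x0 : Int) :
    part1_alt_buyer (tot, d) x0
    = (tot + pvIter 2000 x0, ((pvRaw x0 2000).foldl pvGB (PySem.Set.empty, d)).2) := by
  have hp : (PySem.List.pyRange 0 2000 1).foldl part1_alt_price_step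
      (x0, [PySem.Int.mod x0 10]) = (pvIter 2000 x0, (List.range 2001).map (pvP x0)) := by
    have h0 := B_prices x0 2000
    simp only [Nat.cast_ofNat, show (2000:Nat)+1 = 2001 from rfl] at h0
    exact h0
  have h1 : part1_alt_buyer (tot, d) x0 = (fun xp : Int × List Int =>
      ((tot, d).1 + xp.1, ((PySem.List.pyRange 3 2000 1).foldl
        (part1_alt_window_step xp.2
          ((PySem.List.pyRange 0 2000 1).map
            (fun i => PySem.List.pyGetD xp.2 (i + 1) 0 - PySem.List.pyGetD xp.2 i 0)))
        (PySem.Set.empty, (tot, d).2)).2))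
      ((PySem.List.pyRange 0 2000 1).foldl part1_alt_price_step
        (x0, [PySem.Int.mod x0 10])) := rfl
  rw [h1]
  conv_lhs => rw [show ((tot, d).2) = d from rfl, show ((tot, d).1) = tot from rfl]
  conv_lhs => rw [hp]
  beta_reduce
  conv_lhs => rw [B_diffs x0]
  have hw : (PySem.List.pyRange 3 2000 1).foldl
      (part1_alt_window_step ((List.range 2001).map (pvP x0))
        ((List.range 2000).map (fun i => pvD x0 (i + 1))))
      (PySem.Set.empty, d) = (pvRaw x0 2000).foldl pvGB (PySem.Set.empty, d) := by
    have h0 := B_windows x0 d 2000 (by omega) (by omega)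
    simp only [Nat.cast_ofNat] at h0
    exact h0
  conv_lhs => rw [hw]

-- dict invariant: one event preserves "B's items are A's items with summed values"
lemma step_inv (dA : PySem.Dict (List Int) (List Int)) (dB : PySem.Dict (List Int) Int)
    (w : List Int) (p : Int) (h : dB.items = dA.items.map pvG) :
    (PySem.Dict.insert dB w (dB.getD w 0 + p)).items
    = (PySem.Dict.modify dA w [] (· ++ [p])).items.map pvG := by
  have hfind : dB.items.find? (fun q => q.1 == w)
      = (dA.items.find? (fun q => q.1 == w)).map pvG := by
    rw [h, List.find?_map]
    rfl
  have hcont : PySem.Dict.contains dB w = PySem.Dict.contains dA w := by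
    unfold PySem.Dict.contains
    rw [h, List.any_map]
    rfl
  have hget : dB.getD w 0 = (dA.getD w []).sum := by
    unfold PySem.Dict.getD PySem.Dict.get?
    rw [hfind]
    cases dA.items.find? (fun q => q.1 == w) <;> simp [pvG]
  simp only [PySem.Dict.modify, PySem.Dict.insert, hcont]
  cases hc : PySem.Dict.contains dA w
  · -- key not present: both dicts append a fresh entry
    simp only [Bool.false_eq_true, if_false]
    rw [h, List.map_append]
    simp [pvG, hget, List.sum_append]
  · -- key present: both dicts overwrite in place
    simp only [if_true]
    rw [h, List.map_map, List.map_map]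
    apply List.map_congr_left
    intro a _
    by_cases ha : a.1 = w
    · simp [pvG, ha, hget, List.sum_append]
    · simp [pvG, ha]

lemma fold_inv (l : List (List Int × Int)) :
    ∀ (s : PySem.Set (List Int)) (dA : PySem.Dict (List Int) (List Int))
      (dB : PySem.Dict (List Int) Int), dB.items = dA.items.map pvG →
    (l.foldl pvGB (s, dB)).1 = (l.foldl pvGA (s, dA)).1 ∧
    (l.foldl pvGB (s, dB)).2.items = (l.foldl pvGA (s, dA)).2.items.map pvG := by
  induction l with
  | nil => intro s dA dB h; exact ⟨rfl, h⟩
  | cons e t ih =>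
    intro s dA dB h
    simp only [List.foldl_cons]
    by_cases hc : s.contains e.1
    · simp only [pvGA, pvGB, hc, if_true]
      exact ih s dA dB h
    · simp only [pvGA, pvGB, hc]
      exact ih _ _ _ (step_inv dA dB e.1 e.2 h)

lemma outer_inv (data : List Int) :
    ∀ (tot : Int) (dA : PySem.Dict (List Int) (List Int)) (dB : PySem.Dict (List Int) Int),
      dB.items = dA.items.map pvG →
    (data.foldl part1_alt_buyer (tot, dB)).1 = (data.foldl part1_buyer (tot, dA)).1 ∧
    (data.foldl part1_alt_buyer (tot, dB)).2.items
      = (data.foldl part1_buyer (tot, dA)).2.items.map pvG := by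
  induction data with
  | nil => intro tot dA dB h; exact ⟨rfl, h⟩
  | cons x t ih =>
    intro tot dA dB h
    simp only [List.foldl_cons]
    rw [part1_alt_buyer_eq tot dB x, part1_buyer_eq tot dA x]
    exact ih _ _ _ (fold_inv (pvRaw x 2000) PySem.Set.empty dA dB h).2

-- ===== VERDICT (by name: the statement is the Claim_ definition above) =====
theorem part1_spec : Claim_equal_part1 := by
  intro data _ _
  obtain ⟨h1, h2⟩ := outer_inv data 0 (PySem.Dict.mk []) (PySem.Dict.mk []) rfl
  have hv : (data.foldl part1_alt_buyer (0, PySem.Dict.mk [])).2.values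
      = ((data.foldl part1_buyer (0, PySem.Dict.mk [])).2.values).map (fun nums => nums.sum) := by
    unfold PySem.Dict.values
    rw [h2, List.map_map, List.map_map]
    rfl
  show ((data.foldl part1_buyer (0, PySem.Dict.mk [])).1,
      (PySem.List.max? ((data.foldl part1_buyer (0, PySem.Dict.mk [])).2.values.map
        (fun nums => nums.sum)) (fun v => v)).getD 0)
    = ((data.foldl part1_alt_buyer (0, PySem.Dict.mk [])).1,
      (PySem.List.max? ((data.foldl part1_alt_buyer (0, PySem.Dict.mk [])).2.values)
        (fun v => v)).getD 0)
  rw [← h1, ← hv]
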